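-- pv_equiv track=rewrite | github.com/FrancisTX/Rushhour-puzzle | rushhour.py | blocking_distance_heuristic
-- ===== SOURCE A (Python) =====
-- def blocking_distance_heuristic(cur_state):
--     blocking_car = 1
--     for i in range(len(cur_state[2])):
--         if cur_state[2][i] != "-" and cur_state[2][i] !=  "X":
--             blocking_car += 1
--
--     for i in range(len(cur_state[2])- 1, 0, -1):
--         if cur_state[2][i] !=  "X":
--             blocking_car += 1
--     return blocking_car
-- ===== SOURCE B (Python) =====
-- def blocking_distance_heuristic(cur_state):
--     # Single pass with a per-cell weight table: each cell past index 0
--     # contributes 0 for 'X', 1 for '-', 2 otherwise; the head cell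
--     # contributes 1 unless it is '-' or 'X'; plus the base score 1.
--     row = cur_state[2]
--     if not row:
--         return 1
--     score = 1 + (0 if row[0] in ("-", "X") else 1)
--     for c in row[1:]:
--         score += 0 if c == "X" else (1 if c == "-" else 2)
--     return score
-- ===== Notes on version B (the rewrite author's own statement) =====
-- stated objective: alternative
-- what changed: Replaced A's two staged index loops (range + repeated indexing) with a single pass over the row that adds a per-cell weight (0 for 'X', 1 for '-', 2 otherwise) for cells past the head, the head handled separately.
import Mathlib
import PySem

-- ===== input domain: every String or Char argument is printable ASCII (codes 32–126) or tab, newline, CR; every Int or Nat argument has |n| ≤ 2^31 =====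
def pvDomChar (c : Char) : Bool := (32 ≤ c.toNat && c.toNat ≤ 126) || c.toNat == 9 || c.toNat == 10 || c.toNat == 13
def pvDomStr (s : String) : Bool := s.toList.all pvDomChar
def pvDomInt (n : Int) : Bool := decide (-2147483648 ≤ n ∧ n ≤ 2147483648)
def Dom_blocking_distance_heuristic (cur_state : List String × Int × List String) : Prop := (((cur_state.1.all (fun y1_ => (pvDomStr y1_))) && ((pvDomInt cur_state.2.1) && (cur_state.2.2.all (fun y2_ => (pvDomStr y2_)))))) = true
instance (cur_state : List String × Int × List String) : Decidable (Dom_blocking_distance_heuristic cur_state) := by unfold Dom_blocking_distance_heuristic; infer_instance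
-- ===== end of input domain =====

-- B replaces A's two staged index loops with one structural recursion assigning each
-- cell past the head a combined weight (0/'X', 1/'-', 2 otherwise) (objective: alternative).

-- ===== PORT A =====
def blocking_distance_heuristic (cur_state : List String × Int × List String) : Int :=
  let row := cur_state.2.2
  let b1 : Int := (PySem.List.pyRange 0 (PySem.List.len row) 1).foldl
    (fun acc i => if PySem.List.pyGetD row i "" ≠ "-" ∧ PySem.List.pyGetD row i "" ≠ "X" then acc + 1 else acc) 1
  (PySem.List.pyRange (PySem.List.len row - 1) 0 (-1)).foldl
    (fun acc i => if PySem.List.pyGetD row i "" ≠ "X" then acc + 1 else acc) b1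

-- ===== PORT B =====
def blocking_distance_heuristic_alt (cur_state : List String × Int × List String) : Int :=
  match cur_state.2.2 with
  | [] => 1
  | h :: t => t.foldl
      (fun acc c => acc + (if c = "X" then 0 else if c = "-" then 1 else 2))
      (1 + (if h = "-" ∨ h = "X" then 0 else 1))

-- ===== PRECONDITION & SPEC =====
def Spec_blocking_distance_heuristic (cur_state : List String × Int × List String) (out : Int) : Prop := out = blocking_distance_heuristic_alt cur_state
instance (cur_state : List String × Int × List String) (out : Int) : Decidable (Spec_blocking_distance_heuristic cur_state out) := by unfold Spec_blocking_distance_heuristic; infer_instance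

-- ===== CLAIM (what is proved, stated in full; the proofs are below) =====
def Claim_equal_blocking_distance_heuristic : Prop := ∀ (cur_state : List String × Int × List String), Dom_blocking_distance_heuristic cur_state → Spec_blocking_distance_heuristic cur_state (blocking_distance_heuristic cur_state)

-- ===== LEMMAS AND PROOFS =====

-- folding the weight table equals init plus the two per-element filtered counts
lemma foldl_weight_eq_countP (l : List String) (init : Int) :
    l.foldl (fun acc c => acc + (if c = "X" then 0 else if c = "-" then 1 else 2)) init
      = init + (l.countP (fun s => decide (s ≠ "-" ∧ s ≠ "X")) : Int)
          + (l.countP (fun s => decide (s ≠ "X")) : Int) := by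
  induction l generalizing init with
  | nil => simp
  | cons x xs ih =>
    rw [List.foldl_cons, ih, List.countP_cons, List.countP_cons]
    by_cases h2 : x = "X"
    · simp [h2]
    · by_cases h1 : x = "-"
      · simp [h1]; ring
      · simp [h1, h2]; ring

-- A's two loops compute 1 + countP row (≠'-' ∧ ≠'X') + countP (row.drop 1) (≠'X')
lemma portA_eq_counts (cur_state : List String × Int × List String) :
    blocking_distance_heuristic cur_state
      = 1 + (cur_state.2.2.countP (fun s => decide (s ≠ "-" ∧ s ≠ "X")) : Int)
          + ((cur_state.2.2.drop 1).countP (fun s => decide (s ≠ "X")) : Int) := by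
  unfold blocking_distance_heuristic
  set row := cur_state.2.2 with hrow
  simp only
  rw [PySem.List.foldl_pyRange_zero_pyGetD (f := fun (acc : Int) (s : String) => if s ≠ "-" ∧ s ≠ "X" then acc + 1 else acc),
      PySem.List.foldl_ite_add_one]
  have h2 : PySem.List.pyRange (PySem.List.len row - 1) 0 (-1)
      = (PySem.List.pyRange 1 (PySem.List.len row) 1).reverse := by
    rw [PySem.List.pyRange_neg_one_eq_reverse]; norm_num
  rw [h2, List.countP_reverse, PySem.List.foldl_ite_add_one]
  have h3 : List.countP (fun x => decide (PySem.List.pyGetD row x "" ≠ "X"))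
        (PySem.List.pyRange 1 (PySem.List.len row) 1)
      = List.countP (fun s => decide (s ≠ "X"))
          ((PySem.List.pyRange 1 (PySem.List.len row) 1).map (fun j => PySem.List.pyGetD row j "")) := by
    rw [List.countP_map]; rfl
  rw [h3, PySem.List.map_pyGetD_pyRange (xs := row) (a := (1 : Int)) (d := "") (by norm_num)]
  norm_num

-- ===== VERDICT (by name: the statement is the Claim_ definition above) =====
theorem blocking_distance_heuristic_spec : Claim_equal_blocking_distance_heuristic := by
  intro cur_state _
  unfold Spec_blocking_distance_heuristic
  rw [portA_eq_counts]
  unfold blocking_distance_heuristic_alt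
  cases hr : cur_state.2.2 with
  | nil => simp
  | cons h t =>
    simp only [List.drop_succ_cons, List.drop_zero, List.countP_cons]
    rw [foldl_weight_eq_countP]
    by_cases h1 : h = "-"
    · simp [h1]
    · by_cases h2 : h = "X"
      · simp [h2]
      · simp [h1, h2]; ring
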